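-- pv_equiv track=rewrite | github.com/GenryEden/kpolyakovName | 3789.py | f
-- ===== SOURCE A (Python) =====
-- def f(x):
-- 	k = x % 7
-- 	a = 0
-- 	b = 0
-- 	while x > 0:
-- 		d = x % 7
-- 		if d == k:
-- 			a += 1
-- 		b += d
-- 		x //= 7
-- 	return a, b
-- ===== SOURCE B (Python) =====
-- def f(x):
--     k = x % 7
--     digits = []
--     t = x
--     while t > 0:
--         digits.append(t % 7)
--         t //= 7
--     return (digits.count(k), sum(digits))
-- ===== Notes on version B (the rewrite author's own statement) =====
-- stated objective: simpler
-- what changed: Instead of maintaining two running accumulators with a branch inside the loop, B builds the list of base-7 digits once and then obtains the pair as two independent scans, digits.count(k) and sum(digits).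
import Mathlib
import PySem

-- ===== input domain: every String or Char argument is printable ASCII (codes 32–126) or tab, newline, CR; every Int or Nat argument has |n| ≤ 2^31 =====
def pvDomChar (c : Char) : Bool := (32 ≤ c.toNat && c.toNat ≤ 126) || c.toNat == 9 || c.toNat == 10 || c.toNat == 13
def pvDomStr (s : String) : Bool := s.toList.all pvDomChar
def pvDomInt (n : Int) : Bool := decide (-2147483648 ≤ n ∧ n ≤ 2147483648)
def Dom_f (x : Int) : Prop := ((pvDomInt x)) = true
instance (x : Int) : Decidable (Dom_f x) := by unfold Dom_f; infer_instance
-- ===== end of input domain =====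

-- B builds the base-7 digit list once and answers with two independent scans (count and sum)
-- instead of A's single loop carrying two accumulators and an in-loop branch; same cost, simpler.

-- ===== PORT A =====
-- A's while loop: state (x, a, b), k fixed before the loop.
def fLoop (k x a b : Int) : Int × Int :=
  if h : x > 0 then
    let d := PySem.Int.mod x 7
    fLoop k (PySem.Int.floordiv x 7) (if d == k then a + 1 else a) (b + d)
  else (a, b)
termination_by x.toNat
decreasing_by
  rw [PySem.Int.floordiv_eq_ediv_of_pos (by omega)]
  omega

def f (x : Int) : Int × Int :=
  fLoop (PySem.Int.mod x 7) x 0 0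

-- ===== PORT B =====
-- B's digit-list loop: append t % 7, then t //= 7, while t > 0.
def digits7 (t : Int) : List Int :=
  if h : t > 0 then PySem.Int.mod t 7 :: digits7 (PySem.Int.floordiv t 7) else []
termination_by t.toNat
decreasing_by
  rw [PySem.Int.floordiv_eq_ediv_of_pos (by omega)]
  omega

def f_alt (x : Int) : Int × Int :=
  let k := PySem.Int.mod x 7
  let ds := digits7 x
  ((PySem.List.count ds k : Int), ds.sum)

-- ===== PRECONDITION & SPEC =====
def Spec_f (x : Int) (out : Int × Int) : Prop := out = f_alt x
instance (x : Int) (out : Int × Int) : Decidable (Spec_f x out) := by unfold Spec_f; infer_instance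

-- ===== CLAIM (what is proved, stated in full; the proofs are below) =====
def Claim_equal_f : Prop := ∀ (x : Int), Dom_f x → Spec_f x (f x)

-- ===== LEMMAS AND PROOFS =====

-- Loop invariant: A's loop adds the count of k among the remaining digits to a,
-- and their sum to b.
theorem fLoop_eq (k x : Int) : ∀ (a b : Int),
    fLoop k x a b = (a + (PySem.List.count (digits7 x) k : Int), b + (digits7 x).sum) := by
  induction x using digits7.induct with
  | case1 x h ih =>
    intro a b
    rw [fLoop, digits7]
    simp only [h, dif_pos]
    rw [ih]
    simp only [PySem.List.count_eq, List.count_cons, List.sum_cons, Prod.mk.injEq]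
    refine ⟨?_, by ring⟩
    split_ifs with hd <;> simp [hd] <;> push_cast <;> ring
  | case2 x h =>
    intro a b
    rw [fLoop, digits7]
    simp [h]

-- ===== VERDICT (by name: the statement is the Claim_ definition above) =====
theorem f_spec : Claim_equal_f := by
  intro x _
  unfold Spec_f f f_alt
  rw [fLoop_eq]
  simp
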